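-- pv_equiv track=rewrite | github.com/otheobaldo/algoritmoslista5 | algoritmoslista6/FRM-Alg-06-Ex-07.py | divisaoExata
-- ===== SOURCE A (Python) =====
-- def divisaoExata(dividendo):
--     ldivisores = []
--     n = 0
--     while dividendo != n:
--         n = n + 1
--         if dividendo%n == 0:
--             ldivisores.append(n)
--         else:
--             continue
--     del ldivisores[-1]
--     return ldivisores
-- ===== SOURCE B (Python) =====
-- def divisaoExata(dividendo):
--     small = []
--     large = []
--     d = 1
--     while d * d <= dividendo:
--         if dividendo % d == 0:
--             if d != dividendo:
--                 small.append(d)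
--             q = dividendo // d
--             if q != d and q != dividendo:
--                 large.append(q)
--         d = d + 1
--     large.reverse()
--     return small + large
-- ===== Notes on version B (the rewrite author's own statement) =====
-- stated objective: faster
-- what changed: Replaces the O(n) scan of every candidate 1..n with trial division up to sqrt(n) collecting divisor pairs (small ones in order, cofactors reversed), so no sort and no full scan is needed.
-- crash fix: On dividendo = 0 A raises IndexError (del on an empty list) and B returns []; for negative dividendo A loops forever, so Pre_ admits exactly dividendo >= 1. — e.g. on divisaoExata(0): A raises IndexError, B returns []
import Mathlib
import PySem

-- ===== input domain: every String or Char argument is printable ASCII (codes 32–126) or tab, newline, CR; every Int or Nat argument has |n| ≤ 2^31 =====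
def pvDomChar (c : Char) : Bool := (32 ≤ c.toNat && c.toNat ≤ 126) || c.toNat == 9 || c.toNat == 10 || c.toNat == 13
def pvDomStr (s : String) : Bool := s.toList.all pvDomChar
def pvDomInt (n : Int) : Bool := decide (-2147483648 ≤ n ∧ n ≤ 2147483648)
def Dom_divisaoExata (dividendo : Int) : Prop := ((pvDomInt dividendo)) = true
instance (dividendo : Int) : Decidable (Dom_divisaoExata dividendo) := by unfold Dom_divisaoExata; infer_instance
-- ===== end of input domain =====

-- B replaces A's O(n) scan of all candidates 1..n by trial division up to √n collecting
-- divisor pairs (objective: faster, measured). Equivalence is claimed on Pre_ (dividendo ≥ 1):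
-- A raises IndexError on 0 and diverges on negative input.

-- ===== PORT A =====
-- while dividendo != n: n += 1; if dividendo % n == 0: append n   — fuel = remaining steps
def pvLoopA : Nat → Int → Int → List Int → List Int
  | 0, _, _, acc => acc
  | f + 1, d, n, acc =>
    if d = n then acc
    else
      if PySem.Int.mod d (n + 1) = 0 then pvLoopA f d (n + 1) (acc ++ [n + 1])
      else pvLoopA f d (n + 1) acc

def divisaoExata (dividendo : Int) : List Int :=
  -- 'del ldivisores[-1]' = dropLast on the nonempty list (empty only outside Pre_, where Python raises)
  (pvLoopA (dividendo.toNat + 1) dividendo 0 []).dropLast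

-- ===== PORT B =====
-- while d*d <= dividendo: collect small divisors in s, cofactors in l; return s ++ reverse l
def pvLoopB : Nat → Int → Int → List Int → List Int → List Int × List Int
  | 0, _, _, s, l => (s, l)
  | f + 1, dv, d, s, l =>
    if d * d ≤ dv then
      if PySem.Int.mod dv d = 0 then
        let s' := if d ≠ dv then s ++ [d] else s
        let q := PySem.Int.floordiv dv d
        let l' := if q ≠ d ∧ q ≠ dv then l ++ [q] else l
        pvLoopB f dv (d + 1) s' l'
      else pvLoopB f dv (d + 1) s l
    else (s, l)

def divisaoExata_alt (dividendo : Int) : List Int :=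
  let p := pvLoopB (dividendo.toNat + 1) dividendo 1 [] []
  p.1 ++ p.2.reverse

-- ===== PRECONDITION & SPEC =====
-- Pre_ excludes dividendo = 0 (A raises IndexError) and dividendo < 0 (A's while loop never terminates).
def Pre_divisaoExata (dividendo : Int) : Prop := 1 ≤ dividendo
instance (dividendo : Int) : Decidable (Pre_divisaoExata dividendo) := by unfold Pre_divisaoExata; infer_instance
def pvWitness_divisaoExata : Int := 12

-- On dividendo = 0 A raises IndexError (del on the empty list) while B returns [].
def Raises_divisaoExata (dividendo : Int) : Prop := dividendo = 0
instance (dividendo : Int) : Decidable (Raises_divisaoExata dividendo) := by unfold Raises_divisaoExata; infer_instance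
def pvRaiseWitness_divisaoExata : Int := 0
def pvRaiseWitnessOut_divisaoExata : List Int := []

def Spec_divisaoExata (dividendo : Int) (out : List Int) : Prop := out = divisaoExata_alt dividendo
instance (dividendo : Int) (out : List Int) : Decidable (Spec_divisaoExata dividendo out) := by unfold Spec_divisaoExata; infer_instance

-- ===== CLAIM (what is proved, stated in full; the proofs are below) =====
def Claim_equal_divisaoExata : Prop := ∀ (dividendo : Int), Dom_divisaoExata dividendo → Pre_divisaoExata dividendo → Spec_divisaoExata dividendo (divisaoExata dividendo)
def Claim_raises_divisaoExata : Prop := (∀ (dividendo : Int), Dom_divisaoExata dividendo → Raises_divisaoExata dividendo → ¬ Pre_divisaoExata dividendo) ∧ (Dom_divisaoExata (pvRaiseWitness_divisaoExata) ∧ Raises_divisaoExata (pvRaiseWitness_divisaoExata) ∧ divisaoExata_alt (pvRaiseWitness_divisaoExata) = pvRaiseWitnessOut_divisaoExata)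

-- ===== LEMMAS AND PROOFS =====

-- the ascending list of proper divisors of d (the common value of both ports)
def pvP (d : Int) : List Int :=
  (PySem.List.pyRange 1 d 1).filter (fun k => decide (PySem.Int.mod d k = 0))

-- one past the integer square root of d
def pvK (d : Int) : Int := ((Nat.sqrt d.toNat : Nat) : Int) + 1

def pvS (dv k : Int) : List Int :=
  (PySem.List.pyRange k (pvK dv) 1).filter (fun j => decide (PySem.Int.mod dv j = 0 ∧ j ≠ dv))

def pvL (dv k : Int) : List Int :=
  ((PySem.List.pyRange k (pvK dv) 1).filter (fun j => decide (PySem.Int.mod dv j = 0))).filterMap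
    (fun j => if PySem.Int.floordiv dv j ≠ j ∧ PySem.Int.floordiv dv j ≠ dv
              then some (PySem.Int.floordiv dv j) else none)

theorem pvSq_iff (dv k : Int) (hk : 1 ≤ k) (hd : 1 ≤ dv) : k * k ≤ dv ↔ k < pvK dv := by
  unfold pvK
  have hkk : k = (k.toNat : Int) := by omega
  have hdd : dv = (dv.toNat : Int) := by omega
  rw [hkk, hdd]
  rw [show ((k.toNat : Int)) * (k.toNat : Int) ≤ ((dv.toNat : Int)) ↔ k.toNat * k.toNat ≤ dv.toNat by exact_mod_cast Iff.rfl]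
  rw [show ((k.toNat : Int)) < ((Nat.sqrt ((dv.toNat : Int)).toNat : Nat) : Int) + 1 ↔ k.toNat ≤ Nat.sqrt ((dv.toNat : Int)).toNat by omega]
  rw [Int.toNat_natCast]
  exact Nat.le_sqrt.symm

theorem pvLoopA_spec (f : Nat) (d n : Int) (acc : List Int)
    (h0 : 0 ≤ n) (h1 : n ≤ d) (hf : (d - n).toNat = f) :
    pvLoopA (f + 1) d n acc
      = acc ++ (PySem.List.pyRange (n + 1) (d + 1) 1).filter (fun k => decide (PySem.Int.mod d k = 0)) := by
  induction f generalizing n acc with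
  | zero =>
    have hnd : n = d := by omega
    subst hnd
    simp [pvLoopA, PySem.List.pyRange_one_eq_nil (le_refl (n + 1))]
  | succ f ih =>
    have hnd : n < d := by omega
    rw [PySem.List.pyRange_one_cons (by omega : n + 1 < d + 1)]
    show (if d = n then acc else _) = _
    rw [if_neg (by omega)]
    rw [List.filter_cons]
    by_cases hm : PySem.Int.mod d (n + 1) = 0
    · simp only [hm, decide_true, if_pos]
      rw [ih (n + 1) (acc ++ [n + 1]) (by omega) (by omega) (by omega)]
      simp
    · simp only [hm, decide_false]
      rw [ih (n + 1) acc (by omega) (by omega) (by omega)]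
      simp

theorem pvA_eq (d : Int) (hd : 1 ≤ d) : divisaoExata d = pvP d := by
  unfold divisaoExata pvP
  rw [show d.toNat = (d - 0).toNat by omega]
  rw [pvLoopA_spec (d - 0).toNat d 0 [] (le_refl 0) (by omega) rfl]
  rw [show (0:Int) + 1 = 1 by norm_num]
  rw [PySem.List.pyRange_one_succ_right (by omega : (1:Int) ≤ d)]
  rw [List.filter_append]
  have hdd : List.filter (fun k => decide (PySem.Int.mod d k = 0)) [d] = [d] := by
    simp [PySem.Int.mod_eq_zero_iff_dvd]
  rw [hdd, List.nil_append, List.dropLast_concat]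

theorem pvLoopB_spec (f : Nat) (dv : Int) (hd : 1 ≤ dv) :
    ∀ (k : Int) (s l : List Int), 1 ≤ k → (dv + 1 - k).toNat ≤ f →
    pvLoopB f dv k s l = (s ++ pvS dv k, l ++ pvL dv k) := by
  induction f with
  | zero =>
    intro k s l hk hf
    have hKk : pvK dv ≤ k := by
      unfold pvK
      have := Nat.sqrt_le_self dv.toNat
      omega
    unfold pvS pvL
    rw [PySem.List.pyRange_one_eq_nil hKk]
    simp [pvLoopB]
  | succ f ih =>
    intro k s l hk hf
    simp only [pvLoopB]
    by_cases hcond : k * k ≤ dv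
    · have hklt : k < pvK dv := (pvSq_iff dv k hk hd).mp hcond
      rw [if_pos hcond]
      have hrec : ∀ s' l', pvLoopB f dv (k + 1) s' l' = (s' ++ pvS dv (k + 1), l' ++ pvL dv (k + 1)) :=
        fun s' l' => ih (k + 1) s' l' (by omega) (by omega)
      have hS : pvS dv k = (if PySem.Int.mod dv k = 0 ∧ k ≠ dv then [k] else []) ++ pvS dv (k + 1) := by
        unfold pvS
        rw [PySem.List.pyRange_one_cons hklt, List.filter_cons]
        by_cases h : PySem.Int.mod dv k = 0 ∧ k ≠ dv <;> simp [h]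
      have hL : pvL dv k = (if PySem.Int.mod dv k = 0 ∧ PySem.Int.floordiv dv k ≠ k ∧ PySem.Int.floordiv dv k ≠ dv then [PySem.Int.floordiv dv k] else []) ++ pvL dv (k + 1) := by
        unfold pvL
        rw [PySem.List.pyRange_one_cons hklt, List.filter_cons]
        by_cases h1 : PySem.Int.mod dv k = 0
        · by_cases h2 : PySem.Int.floordiv dv k ≠ k ∧ PySem.Int.floordiv dv k ≠ dv <;>
            simp [h1, h2]
        · simp [h1]
      rw [hS, hL]
      by_cases hm : PySem.Int.mod dv k = 0
      · rw [if_pos hm]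
        by_cases hq : PySem.Int.floordiv dv k ≠ k ∧ PySem.Int.floordiv dv k ≠ dv <;>
          by_cases hkd : k ≠ dv <;>
          simp [hrec, hm, hq, hkd]
      · rw [if_neg hm]
        simp [hrec, hm]
    · rw [if_neg hcond]
      have hKk : pvK dv ≤ k := by
        by_contra h
        exact hcond ((pvSq_iff dv k hk hd).mpr (by omega))
      unfold pvS pvL
      rw [PySem.List.pyRange_one_eq_nil hKk]
      simp

theorem pvB_eq (d : Int) (hd : 1 ≤ d) :
    divisaoExata_alt d = pvS d 1 ++ (pvL d 1).reverse := by
  unfold divisaoExata_alt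
  rw [pvLoopB_spec (d.toNat + 1) d hd 1 [] [] (le_refl 1) (by omega)]
  simp

-- exact division facts for a positive divisor
theorem pvDivFact (d j : Int) (hd : 1 ≤ d) (hj : 1 ≤ j) (hm : PySem.Int.mod d j = 0) :
    j * PySem.Int.floordiv d j = d ∧ 1 ≤ PySem.Int.floordiv d j := by
  have hdvd : j ∣ d := (PySem.Int.mod_eq_zero_iff_dvd d j).mp hm
  rw [PySem.Int.floordiv_eq_ediv_of_pos (by omega)]
  have h1 : d / j * j = d := Int.ediv_mul_cancel hdvd
  refine ⟨by linarith [mul_comm j (d / j)], ?_⟩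
  nlinarith [h1]

theorem pvModOfFactor (d j q : Int) (h : j * q = d) : PySem.Int.mod d q = 0 :=
  (PySem.Int.mod_eq_zero_iff_dvd d q).mpr (Dvd.intro_left j h)

theorem pvL_elem (d b : Int) (hd : 1 ≤ d) (hb : b ∈ pvL d 1) :
    1 ≤ b ∧ b < d ∧ PySem.Int.mod d b = 0 ∧ d < b * b := by
  unfold pvL at hb
  obtain ⟨j, hjmem, hj⟩ := List.mem_filterMap.mp hb
  rw [List.mem_filter, PySem.List.mem_pyRange_one] at hjmem
  obtain ⟨⟨hj1, hjK⟩, hjmod⟩ := hjmem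
  have hjmod : PySem.Int.mod d j = 0 := by simpa using hjmod
  split at hj
  · rename_i hcond
    obtain ⟨hne_j, hne_d⟩ := hcond
    have hbq : b = PySem.Int.floordiv d j := by simpa using hj.symm
    obtain ⟨hprod, hq1⟩ := pvDivFact d j hd hj1 hjmod
    rw [← hbq] at hprod hq1
    have hjj : j * j ≤ d := (pvSq_iff d j hj1 hd).mpr hjK
    have hjb : j < b := by
      rcases lt_or_ge j b with h | h
      · exact h
      · exfalso
        have hbj : b < j := lt_of_le_of_ne h (by rw [hbq]; exact hne_j)
        nlinarith
    have hbd : b ≤ d := by nlinarith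
    refine ⟨by nlinarith, lt_of_le_of_ne hbd (by rw [hbq]; exact hne_d), pvModOfFactor d j b hprod, by nlinarith⟩
  · simp at hj

theorem pvMemIff (d x : Int) (hd : 1 ≤ d) :
    (x ∈ pvS d 1 ∨ x ∈ pvL d 1) ↔ (1 ≤ x ∧ x < d ∧ PySem.Int.mod d x = 0) := by
  constructor
  · rintro (hx | hx)
    · unfold pvS at hx
      rw [List.mem_filter, PySem.List.mem_pyRange_one] at hx
      obtain ⟨⟨hx1, _⟩, hxc⟩ := hx
      have hxc : PySem.Int.mod d x = 0 ∧ x ≠ d := by simpa using hxc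
      have hxd : x ∣ d := (PySem.Int.mod_eq_zero_iff_dvd d x).mp hxc.1
      exact ⟨hx1, lt_of_le_of_ne (Int.le_of_dvd (by omega) hxd) hxc.2, hxc.1⟩
    · obtain ⟨h1, h2, h3, _⟩ := pvL_elem d x hd hx
      exact ⟨h1, h2, h3⟩
  · rintro ⟨hx1, hxd, hxm⟩
    by_cases hK : x < pvK d
    · left
      unfold pvS
      rw [List.mem_filter, PySem.List.mem_pyRange_one]
      exact ⟨⟨hx1, hK⟩, by simp [hxm]; omega⟩
    · right
      have hxx : d < x * x := by
        rcases lt_or_ge d (x * x) with h | h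
        · exact h
        · exact absurd ((pvSq_iff d x hx1 hd).mp h) hK
      obtain ⟨hprod, hq1⟩ := pvDivFact d x hd hx1 hxm
      set j := PySem.Int.floordiv d x with hjdef
      have hjx : j < x := by nlinarith
      have hjK : j < pvK d := (pvSq_iff d j hq1 hd).mp (by nlinarith)
      have hjm : PySem.Int.mod d j = 0 := pvModOfFactor d x j hprod
      unfold pvL
      rw [List.mem_filterMap]
      refine ⟨j, ?_, ?_⟩
      · rw [List.mem_filter, PySem.List.mem_pyRange_one]
        exact ⟨⟨hq1, hjK⟩, by simp [hjm]⟩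
      · have hfd : PySem.Int.floordiv d j = x := by
          rw [PySem.Int.floordiv_eq_ediv_of_pos (by omega)]
          rw [← hprod, mul_comm x j]
          exact Int.mul_ediv_cancel_left x (by omega)
        rw [hfd, if_pos ⟨by omega, by omega⟩]

theorem pvPairS (d : Int) : (pvS d 1).Pairwise (· < ·) :=
  (PySem.List.pairwise_lt_pyRange_one 1 (pvK d)).filter _

theorem pvPairP (d : Int) : (pvP d).Pairwise (· < ·) :=
  (PySem.List.pairwise_lt_pyRange_one 1 d).filter _

theorem pvPairL (d : Int) (hd : 1 ≤ d) : (pvL d 1).Pairwise (· > ·) := by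
  unfold pvL
  rw [List.pairwise_filterMap]
  have base : (List.filter (fun j => decide (PySem.Int.mod d j = 0))
      (PySem.List.pyRange 1 (pvK d))).Pairwise (· < ·) :=
    (PySem.List.pairwise_lt_pyRange_one 1 (pvK d)).filter _
  refine (List.Pairwise.and_mem.mp base).imp ?_
  rintro j j' ⟨hjmem, hj'mem, hlt⟩ b hb b' hb'
  rw [List.mem_filter, PySem.List.mem_pyRange_one] at hjmem hj'mem
  obtain ⟨⟨hj1, _⟩, hjm⟩ := hjmem
  obtain ⟨⟨hj'1, _⟩, hj'm⟩ := hj'mem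
  have hjm : PySem.Int.mod d j = 0 := by simpa using hjm
  have hj'm : PySem.Int.mod d j' = 0 := by simpa using hj'm
  split at hb
  · have hbq : b = PySem.Int.floordiv d j := (Option.some.inj hb).symm
    split at hb'
    · have hb'q : b' = PySem.Int.floordiv d j' := (Option.some.inj hb').symm
      obtain ⟨hp, h1⟩ := pvDivFact d j hd hj1 hjm
      obtain ⟨hp', h1'⟩ := pvDivFact d j' hd hj'1 hj'm
      rw [← hbq] at hp h1
      rw [← hb'q] at hp' h1'
      show b' < b
      nlinarith
    · simp at hb'
  · simp at hb

theorem pvMain (d : Int) (hd : 1 ≤ d) : pvP d = pvS d 1 ++ (pvL d 1).reverse := by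
  have hpairL : ((pvL d 1).reverse).Pairwise (· < ·) :=
    List.pairwise_reverse.mpr (pvPairL d hd)
  have hcross : ∀ a ∈ pvS d 1, ∀ b ∈ (pvL d 1).reverse, a < b := by
    intro a ha b hb
    rw [List.mem_reverse] at hb
    obtain ⟨hb1, _, _, hbb⟩ := pvL_elem d b hd hb
    unfold pvS at ha
    rw [List.mem_filter, PySem.List.mem_pyRange_one] at ha
    have haa : a * a ≤ d := (pvSq_iff d a ha.1.1 hd).mpr ha.1.2
    nlinarith
  have hwhole : (pvS d 1 ++ (pvL d 1).reverse).Pairwise (· < ·) :=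
    List.pairwise_append.mpr ⟨pvPairS d, hpairL, hcross⟩
  apply List.SortedLT.eq_of_mem_iff (pvPairP d).sortedLT hwhole.sortedLT
  intro x
  rw [List.mem_append, List.mem_reverse, pvMemIff d x hd]
  unfold pvP
  rw [List.mem_filter, PySem.List.mem_pyRange_one]
  constructor
  · rintro ⟨⟨h1, h2⟩, h3⟩
    exact ⟨h1, h2, by simpa using h3⟩
  · rintro ⟨h1, h2, h3⟩
    exact ⟨⟨h1, h2⟩, by simpa using h3⟩

-- ===== VERDICT (by name: the statement is the Claim_ definition above) =====
theorem divisaoExata_spec : Claim_equal_divisaoExata := by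
  intro d _ hpre
  unfold Spec_divisaoExata
  rw [pvA_eq d hpre, pvB_eq d hpre, pvMain d hpre]

@[simp] theorem divisaoExata_raises : Claim_raises_divisaoExata := by
  unfold Claim_raises_divisaoExata
  exact ⟨fun d _ h => by unfold Raises_divisaoExata at h; unfold Pre_divisaoExata; omega, by decide⟩
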